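-- pv_equiv track=rewrite | github.com/ojanojan1453/Pemrograman-1 | MODUL 6/PRAK604-2310817210021-RAKHMAD FAUZHAN RAMADHAN.py | dekode_pesan
-- ===== SOURCE A (Python) =====
-- def dekode_pesan(kode, pesan_diterima):
--     pesan_terdekripsi = ""
--     hitung_bintang = 0
--     hitung_pagar = 0
--
--     for i in range(min(len(kode), len(pesan_diterima))):
--         if kode[i] == pesan_diterima[i]:
--             pesan_terdekripsi += "*"
--             hitung_bintang += 1
--         else:
--             pesan_terdekripsi += "#"
--             hitung_pagar += 1
--
--     return pesan_terdekripsi, hitung_bintang, hitung_pagar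
-- ===== SOURCE B (Python) =====
-- def dekode_pesan(kode, pesan_diterima):
--     n = min(len(kode), len(pesan_diterima))
--     pagar = {i for i in range(n) if kode[i] != pesan_diterima[i]}
--     pesan_terdekripsi = "".join("#" if i in pagar else "*" for i in range(n))
--     return pesan_terdekripsi, n - len(pagar), len(pagar)
-- ===== Notes on version B (the rewrite author's own statement) =====
-- stated objective: alternative
-- what changed: B first collects the set of mismatch positions, then renders the output string by membership in that set and derives both counters arithmetically from the set's cardinality (hashes = |set|, stars = n - |set|), replacing A's fused loop that builds the string and maintains two running counters together.
import Mathlib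
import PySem

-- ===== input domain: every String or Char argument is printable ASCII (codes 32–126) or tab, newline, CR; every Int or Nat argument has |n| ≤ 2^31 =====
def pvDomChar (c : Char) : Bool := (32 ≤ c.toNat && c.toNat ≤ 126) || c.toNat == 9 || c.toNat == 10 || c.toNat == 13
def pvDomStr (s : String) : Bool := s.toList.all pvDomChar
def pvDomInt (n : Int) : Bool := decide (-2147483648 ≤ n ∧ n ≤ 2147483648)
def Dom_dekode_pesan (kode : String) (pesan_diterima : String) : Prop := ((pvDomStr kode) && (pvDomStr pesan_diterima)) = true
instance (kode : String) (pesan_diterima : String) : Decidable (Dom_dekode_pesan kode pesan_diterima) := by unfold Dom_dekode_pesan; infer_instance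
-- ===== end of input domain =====

-- B collects the set of mismatch positions first, renders the string from membership in
-- that set, and derives both counters from the set's cardinality, replacing A's fused
-- loop that builds the string and maintains two running counters together (objective: alternative).

-- ===== PORT A =====
-- A's fused loop: for i in range(min(len(kode), len(pesan))), append '*'/'#' and bump a counter.
-- Indices drawn from range(min …) are always in range, so kode[i] is ported as getD (exact here).
def dekode_pesan (kode : String) (pesan_diterima : String) : String × Int × Int :=
  let k := kode.toList
  let p := pesan_diterima.toList
  let st := (List.range (min k.length p.length)).foldl
    (fun (st : List Char × Int × Int) i =>
      if k.getD i ' ' = p.getD i ' ' then (st.1 ++ ['*'], st.2.1 + 1, st.2.2)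
      else (st.1 ++ ['#'], st.2.1, st.2.2 + 1))
    ([], 0, 0)
  (String.mk st.1, st.2.1, st.2.2)

-- ===== PORT B =====
-- B: pagar = {i in range(n) | kode[i] != pesan[i]} as a PySem.Set; the string by membership
-- in pagar; hitung_pagar = len(pagar), hitung_bintang = n - len(pagar).
def dekode_pesan_alt (kode : String) (pesan_diterima : String) : String × Int × Int :=
  let k := kode.toList
  let p := pesan_diterima.toList
  let n := min k.length p.length
  let pagar : PySem.Set Nat :=
    PySem.Set.ofList ((List.range n).filter (fun i => !(k.getD i ' ' == p.getD i ' ')))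
  let res := (List.range n).map (fun i => if PySem.Set.contains pagar i then '#' else '*')
  (String.mk res, (n : Int) - PySem.Set.len pagar, PySem.Set.len pagar)

-- ===== PRECONDITION & SPEC =====
def Spec_dekode_pesan (kode : String) (pesan_diterima : String) (out : String × Int × Int) : Prop := out = dekode_pesan_alt kode pesan_diterima
instance (kode : String) (pesan_diterima : String) (out : String × Int × Int) : Decidable (Spec_dekode_pesan kode pesan_diterima out) := by unfold Spec_dekode_pesan; infer_instance

-- ===== CLAIM (what is proved, stated in full; the proofs are below) =====
def Claim_equal_dekode_pesan : Prop := ∀ (kode : String) (pesan_diterima : String), Dom_dekode_pesan kode pesan_diterima → Spec_dekode_pesan kode pesan_diterima (dekode_pesan kode pesan_diterima)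

-- ===== LEMMAS AND PROOFS =====

-- A's loop, unrolled from the right: the built string is a map over range n and the two
-- counters are the counts of '*' and '#' in it.
theorem dekode_loop_eq (k p : List Char) (n : Nat) (acc : List Char) (b h : Int) :
    (List.range n).foldl
      (fun (st : List Char × Int × Int) i =>
        if k.getD i ' ' = p.getD i ' ' then (st.1 ++ ['*'], st.2.1 + 1, st.2.2)
        else (st.1 ++ ['#'], st.2.1, st.2.2 + 1))
      (acc, b, h)
    = (acc ++ (List.range n).map (fun i => if k.getD i ' ' = p.getD i ' ' then '*' else '#'),
       b + (((List.range n).map (fun i => if k.getD i ' ' = p.getD i ' ' then '*' else '#')).count '*' : Int),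
       h + (((List.range n).map (fun i => if k.getD i ' ' = p.getD i ' ' then '*' else '#')).count '#' : Int)) := by
  induction n generalizing acc b h with
  | zero => simp
  | succ n ih =>
    rw [List.range_succ, List.foldl_append, ih, List.map_append]
    simp only [List.foldl_cons, List.foldl_nil, List.map_cons, List.map_nil, List.count_append]
    by_cases hc : k.getD n ' ' = p.getD n ' '
    · simp only [if_pos hc, Prod.mk.injEq]
      refine ⟨by simp, ?_, ?_⟩ <;> simp <;> ring
    · simp only [if_neg hc, Prod.mk.injEq]
      refine ⟨by simp, ?_, ?_⟩ <;> simp <;> ring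

theorem foldl_add_nodup {α : Type} [BEq α] [LawfulBEq α] (l acc : List α) (h : (acc ++ l).Nodup) :
    l.foldl PySem.Set.add acc = acc ++ l := by
  induction l generalizing acc with
  | nil => simp
  | cons a l ih =>
    have ha : a ∉ acc := by
      intro hm
      exact (List.disjoint_of_nodup_append h) hm (by simp)
    have hadd : PySem.Set.add acc a = acc ++ [a] := by
      simp [PySem.Set.add, PySem.Set.contains, ha]
    rw [List.foldl_cons, hadd, ih (acc ++ [a]) (by simpa using h)]
    simp

theorem set_ofList_nodup {α : Type} [BEq α] [LawfulBEq α] (l : List α) (h : l.Nodup) :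
    PySem.Set.ofList l = l := by
  have := foldl_add_nodup l [] (by simpa using h)
  simpa [PySem.Set.ofList_eq_foldl] using this

theorem spec_main (kode pesan_diterima : String) :
    dekode_pesan kode pesan_diterima = dekode_pesan_alt kode pesan_diterima := by
  simp only [dekode_pesan, dekode_pesan_alt]
  rw [dekode_loop_eq]
  set k := kode.toList with hk
  set p := pesan_diterima.toList with hp
  set n := min k.length p.length with hn
  set L := (List.range n).filter (fun i => !(k.getD i ' ' == p.getD i ' ')) with hL
  have hnodup : L.Nodup := List.Nodup.filter _ (List.nodup_range)
  have hpagar : PySem.Set.ofList L = L := set_ofList_nodup L hnodup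
  rw [hpagar]
  have hmap : (List.range n).map (fun i => if PySem.Set.contains L i then '#' else '*')
      = (List.range n).map (fun i => if k.getD i ' ' = p.getD i ' ' then '*' else '#') := by
    apply List.map_congr_left
    intro i hi
    by_cases hc : k.getD i ' ' = p.getD i ' '
    · have hiL : i ∉ L := by
        simp only [hL, List.mem_filter, List.mem_range, Bool.not_eq_true', beq_eq_false_iff_ne, ne_eq, not_and, not_not]
        exact fun _ => hc
      simp only [PySem.Set.contains]
      rw [if_neg (by simpa [List.contains_iff_mem] using hiL), if_pos hc]
    · have hiL : i ∈ L := by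
        simp only [hL, List.mem_filter, List.mem_range, Bool.not_eq_true', beq_eq_false_iff_ne, ne_eq]
        exact ⟨by simpa using hi, hc⟩
      simp only [PySem.Set.contains]
      rw [if_pos (by simpa [List.contains_iff_mem] using hiL), if_neg hc]
  have hstar : ((List.range n).map (fun i => if k.getD i ' ' = p.getD i ' ' then '*' else '#')).count '*'
      = List.countP (fun i => k.getD i ' ' == p.getD i ' ') (List.range n) := by
    rw [List.count_eq_countP, List.countP_map]
    apply List.countP_congr
    intro i _
    by_cases hc : k.getD i ' ' = p.getD i ' ' <;> simp [hc]
  have hhash : ((List.range n).map (fun i => if k.getD i ' ' = p.getD i ' ' then '*' else '#')).count '#'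
      = List.countP (fun i => !(k.getD i ' ' == p.getD i ' ')) (List.range n) := by
    rw [List.count_eq_countP, List.countP_map]
    apply List.countP_congr
    intro i _
    by_cases hc : k.getD i ' ' = p.getD i ' ' <;> simp [hc]
  have hLlen : L.length = List.countP (fun i => !(k.getD i ' ' == p.getD i ' ')) (List.range n) := by
    rw [hL, ← List.countP_eq_length_filter]
  have hsplit : n = List.countP (fun i => k.getD i ' ' == p.getD i ' ') (List.range n)
      + List.countP (fun i => !(k.getD i ' ' == p.getD i ' ')) (List.range n) := by
    conv_lhs => rw [← List.length_range (n := n)]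
    rw [List.length_eq_countP_add_countP (fun i => k.getD i ' ' == p.getD i ' ')]
    congr 1
    apply List.countP_congr
    intro i _
    by_cases hc : k.getD i ' ' = p.getD i ' ' <;> simp [hc]
  rw [hmap]
  simp only [Prod.mk.injEq, PySem.Set.len]
  refine ⟨by simp, ?_, ?_⟩
  · rw [hstar, hLlen]
    omega
  · rw [hhash, hLlen]
    omega

-- ===== VERDICT (by name: the statement is the Claim_ definition above) =====
theorem dekode_pesan_spec : Claim_equal_dekode_pesan := by
  intro kode pesan _
  exact spec_main kode pesan
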